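-- pv_equiv track=rewrite | github.com/JustinMuecke/SciSen | sciSen/TexToParagraphs.py | remove_tex_cmd
-- ===== SOURCE A (Python) =====
-- def remove_tex_cmd(tex):
--     """removes tex commands \cmd{...} from the input string """
--     text = ""
--     append_next = True
--     open_par = 0 #open parentheses
--     log = ""
--     for l in tex:
--         if log != "": # after \, before {}
--             if l == " ":
--                 text += log+l
--                 log = ""
--             elif l == "{":
--                 log = ""
--                 append_next = False
--                 open_par = 1
--             else:
--                 log += l
--         elif append_next: # outside of command
--             if l == "\\":
--                 log += l
--             else:
--                 text += l
--         else: # within {}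
--             if l == "{":
--                 open_par += 1
--             elif l == "}":
--                 if open_par == 1:
--                     open_par = 0
--                     append_next = True
--                     text += " "
--                 else:
--                     open_par -= 1
--     return text
-- ===== SOURCE B (Python) =====
-- def remove_tex_cmd(tex):
--     """removes tex commands \\cmd{...} from the input string"""
--     out = []
--     i, n = 0, len(tex)
--     while i < n:
--         c = tex[i]
--         if c != '\\':
--             out.append(c)
--             i += 1
--             continue
--         # scan the command name (anything up to a space or '{')
--         j = i + 1
--         while j < n and tex[j] != ' ' and tex[j] != '{':
--             j += 1
--         if j == n:
--             break  # command runs to end of string: dropped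
--         if tex[j] == ' ':
--             out.append(tex[i:j + 1])  # keep '\name '
--             i = j + 1
--         else:
--             # skip the balanced {...}; emit one space only if it closes
--             depth = 1
--             k = j + 1
--             while k < n and depth:
--                 if tex[k] == '{':
--                     depth += 1
--                 elif tex[k] == '}':
--                     depth -= 1
--                 k += 1
--             if depth == 0:
--                 out.append(' ')
--             i = k
--     return ''.join(out)
-- ===== Notes on version B (the rewrite author's own statement) =====
-- stated objective: alternative
-- what changed: Replaced A's single per-character state machine (flags append_next/open_par plus a log accumulator threaded through every character) by an index-based while-loop scanner: on a backslash an inner loop reads the command name up to a space or opening brace, and a second depth-counting inner loop skips the balanced braces, emitting one space only when they close.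
import Mathlib
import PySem

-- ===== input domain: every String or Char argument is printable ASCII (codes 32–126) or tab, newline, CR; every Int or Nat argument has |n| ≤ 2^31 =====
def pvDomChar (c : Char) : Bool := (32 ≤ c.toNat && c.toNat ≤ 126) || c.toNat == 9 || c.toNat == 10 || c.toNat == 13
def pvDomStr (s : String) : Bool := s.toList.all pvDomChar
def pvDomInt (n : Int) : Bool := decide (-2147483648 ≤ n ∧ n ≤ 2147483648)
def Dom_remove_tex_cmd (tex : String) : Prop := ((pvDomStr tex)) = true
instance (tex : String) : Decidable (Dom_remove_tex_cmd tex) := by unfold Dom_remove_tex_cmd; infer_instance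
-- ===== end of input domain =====

-- B replaces A's one-pass four-variable state machine by an index-style scanner with inner loops for the command name and the balanced braces (objective: alternative).

-- ===== PORT A =====
-- A's per-character loop: foldl over the characters with state (text, append_next, open_par, log); strings kept as char lists, joined at the end.
def pvAStep : (List Char × Bool × Int × List Char) → Char → (List Char × Bool × Int × List Char)
  | (text, append_next, open_par, log), l =>
    if log ≠ [] then
      if l = ' ' then (text ++ log ++ [l], append_next, open_par, [])
      else if l = '{' then (text, false, 1, [])
      else (text, append_next, open_par, log ++ [l])
    else if append_next then
      if l = '\\' then (text, append_next, open_par, log ++ [l])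
      else (text ++ [l], append_next, open_par, log)
    else
      if l = '{' then (text, append_next, open_par + 1, log)
      else if l = '}' then
        if open_par = 1 then (text ++ [' '], true, 0, log)
        else (text, append_next, open_par - 1, log)
      else (text, append_next, open_par, log)

def remove_tex_cmd (tex : String) : String :=
  String.mk (tex.toList.foldl pvAStep ([], true, 0, [])).1

-- ===== PORT B =====
-- inner loop 1: read the command name, up to a space or '{' (or end of input)
def pvSplitName : List Char → List Char × List Char
  | [] => ([], [])
  | c :: r =>
    if c = ' ' ∨ c = '{' then ([], c :: r)
    else
      let p := pvSplitName r
      (c :: p.1, p.2)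

-- inner loop 2: skip the balanced braces; true iff the closing brace was reached
def pvSkipBraces : Int → List Char → Bool × List Char
  | _, [] => (false, [])
  | d, c :: r =>
    if c = '{' then pvSkipBraces (d + 1) r
    else if c = '}' then (if d = 1 then (true, r) else pvSkipBraces (d - 1) r)
    else pvSkipBraces d r

theorem pvSplitName_len : ∀ (l : List Char), (pvSplitName l).2.length ≤ l.length := by
  intro l; induction l with
  | nil => simp [pvSplitName]
  | cons c r ih =>
    simp only [pvSplitName]
    split
    · simp
    · simpa using Nat.le_succ_of_le ih

theorem pvSkipBraces_len : ∀ (d : Int) (l : List Char), (pvSkipBraces d l).2.length ≤ l.length := by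
  intro d l; induction l generalizing d with
  | nil => simp [pvSkipBraces]
  | cons c r ih =>
    simp only [pvSkipBraces]
    split
    · exact Nat.le_succ_of_le (ih _)
    · split
      · split
        · simp
        · exact Nat.le_succ_of_le (ih _)
      · exact Nat.le_succ_of_le (ih _)

-- outer loop of B: consume one token per step
def pvBLoop : List Char → List Char
  | [] => []
  | c :: rest =>
    if c = '\\' then
      match h : (pvSplitName rest).2 with
      | [] => []
      | d :: rest' =>
        if d = ' ' then '\\' :: (pvSplitName rest).1 ++ ' ' :: pvBLoop rest'
        else if (pvSkipBraces 1 rest').1 then ' ' :: pvBLoop (pvSkipBraces 1 rest').2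
        else []
    else c :: pvBLoop rest
termination_by l => l.length
decreasing_by
  · have t := pvSplitName_len rest
    rw [h] at t
    simp only [List.length_cons] at t ⊢
    omega
  · have t1 := pvSplitName_len rest
    rw [h] at t1
    have t2 := pvSkipBraces_len 1 rest'
    simp only [List.length_cons] at t1 ⊢
    omega
  · simp only [List.length_cons]; omega

def remove_tex_cmd_alt (tex : String) : String :=
  String.mk (pvBLoop tex.toList)

-- ===== PRECONDITION & SPEC =====
def Spec_remove_tex_cmd (tex : String) (out : String) : Prop := out = remove_tex_cmd_alt tex
instance (tex : String) (out : String) : Decidable (Spec_remove_tex_cmd tex out) := by unfold Spec_remove_tex_cmd; infer_instance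

-- ===== CLAIM (what is proved, stated in full; the proofs are below) =====
def Claim_equal_remove_tex_cmd : Prop := ∀ (tex : String), Dom_remove_tex_cmd tex → Spec_remove_tex_cmd tex (remove_tex_cmd tex)

-- ===== LEMMAS AND PROOFS =====

-- B's continuation after a backslash, with part of the name already read
def pvBLogCont (name : List Char) (rest : List Char) : List Char :=
  match (pvSplitName rest).2 with
  | [] => []
  | d :: rest' =>
    if d = ' ' then '\\' :: (name ++ (pvSplitName rest).1) ++ ' ' :: pvBLoop rest'
    else if (pvSkipBraces 1 rest').1 then ' ' :: pvBLoop (pvSkipBraces 1 rest').2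
    else []

-- B's continuation inside braces at depth d
def pvBBraceCont (d : Int) (rest : List Char) : List Char :=
  if (pvSkipBraces d rest).1 then ' ' :: pvBLoop (pvSkipBraces d rest).2 else []

theorem pvBLoop_cons_bs (rest : List Char) : pvBLoop ('\\' :: rest) = pvBLogCont [] rest := by
  rw [pvBLoop, pvBLogCont]
  simp only [if_pos rfl, List.nil_append]
  rcases h : (pvSplitName rest).2 with _ | ⟨d, rest'⟩ <;> simp [h]

theorem pvMain : ∀ (rest : List Char),
    (∀ (text : List Char) (op : Int),
      ((rest.foldl pvAStep (text, true, op, []))).1 = text ++ pvBLoop rest) ∧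
    (∀ (text : List Char) (op : Int) (name : List Char),
      ((rest.foldl pvAStep (text, true, op, '\\' :: name))).1 = text ++ pvBLogCont name rest) ∧
    (∀ (text : List Char) (op : Int), 1 ≤ op →
      ((rest.foldl pvAStep (text, false, op, []))).1 = text ++ pvBBraceCont op rest) := by
  intro rest
  induction rest with
  | nil =>
    refine ⟨?_, ?_, ?_⟩
    · intro text op; simp [pvBLoop]
    · intro text op name; simp [pvBLogCont, pvSplitName]
    · intro text op _; simp [pvBBraceCont, pvSkipBraces]
  | cons c rest ih =>
    obtain ⟨ihN, ihL, ihB⟩ := ih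
    refine ⟨?_, ?_, ?_⟩
    · -- normal state
      intro text op
      by_cases hbs : c = '\\'
      · subst hbs
        rw [List.foldl_cons,
          show pvAStep (text, true, op, []) '\\' = (text, true, op, ['\\']) from by
            simp [pvAStep],
          ihL text op [], pvBLoop_cons_bs]
      · rw [List.foldl_cons,
          show pvAStep (text, true, op, []) c = (text ++ [c], true, op, []) from by
            simp [pvAStep, hbs],
          ihN, pvBLoop]
        simp [hbs]
    · -- log state
      intro text op name
      by_cases hsp : c = ' '
      · subst hsp
        rw [List.foldl_cons,
          show pvAStep (text, true, op, '\\' :: name) ' '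
              = (text ++ '\\' :: name ++ [' '], true, op, []) from by simp [pvAStep],
          ihN, pvBLogCont]
        simp [pvSplitName]
      · by_cases hob : c = '{'
        · subst hob
          rw [List.foldl_cons,
            show pvAStep (text, true, op, '\\' :: name) '{' = (text, false, 1, []) from by
              simp [pvAStep],
            ihB _ _ (by norm_num), pvBLogCont, pvBBraceCont]
          simp [pvSplitName]
        · rw [List.foldl_cons,
            show pvAStep (text, true, op, '\\' :: name) c
                = (text, true, op, '\\' :: (name ++ [c])) from by simp [pvAStep, hsp, hob],
            ihL, pvBLogCont, pvBLogCont,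
            show pvSplitName (c :: rest)
                = (c :: (pvSplitName rest).1, (pvSplitName rest).2) from by
              rw [pvSplitName]; simp [hsp, hob]]
          rcases h : (pvSplitName rest).2 with _ | ⟨d, rest'⟩ <;> simp
    · -- brace state
      intro text op hop
      by_cases hob : c = '{'
      · subst hob
        rw [List.foldl_cons,
          show pvAStep (text, false, op, []) '{' = (text, false, op + 1, []) from by
            simp [pvAStep],
          ihB _ _ (by omega), pvBBraceCont, pvBBraceCont, pvSkipBraces]
        simp
      · by_cases hcb : c = '}'
        · subst hcb
          by_cases h1 : op = 1
          · subst h1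
            rw [List.foldl_cons,
              show pvAStep (text, false, 1, []) '}' = (text ++ [' '], true, 0, []) from by
                simp [pvAStep],
              ihN, pvBBraceCont, pvSkipBraces]
            simp
          · rw [List.foldl_cons,
              show pvAStep (text, false, op, []) '}' = (text, false, op - 1, []) from by
                simp [pvAStep, h1],
              ihB _ _ (by omega), pvBBraceCont, pvBBraceCont, pvSkipBraces]
            simp [h1]
        · rw [List.foldl_cons,
            show pvAStep (text, false, op, []) c = (text, false, op, []) from by
              simp [pvAStep, hob, hcb],
            ihB _ _ hop, pvBBraceCont, pvBBraceCont, pvSkipBraces]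
          simp [hob, hcb]

-- ===== VERDICT (by name: the statement is the Claim_ definition above) =====
theorem remove_tex_cmd_spec : Claim_equal_remove_tex_cmd := by
  intro tex _
  unfold Spec_remove_tex_cmd remove_tex_cmd remove_tex_cmd_alt
  rw [(pvMain tex.toList).1 [] 0]
  simp
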